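-- pv_equiv track=rewrite | github.com/noahbadner/projectEuler | problem_011.py | greatest_vertical_adjacent_product
-- ===== SOURCE A (Python) =====
-- def greatest_vertical_adjacent_product(n, array_2d):
--     """Returns the greatest of the products of n vertically adjacent numbers in a given 2 dimensional array"""
--     greatest_product = 0
--     for i in range(len(array_2d) - n + 1):
--         for j in range(len(array_2d[i])):
--             temp_product = 1
--             for k in range(n):
--                 temp_product *= array_2d[i + k][j]
--             greatest_product = max(greatest_product, temp_product)
--     return greatest_product
-- ===== SOURCE B (Python) =====
-- def _window_products(n, vals):
--     """Products of every length-n contiguous window of vals, via a sliding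
--     window tracking a zero count and the product of the nonzero entries,
--     updated incrementally (one multiply and one exact divide per step)."""
--     if n < 1 or len(vals) < n:
--         return []
--     zeros = 0
--     prod = 1
--     for x in vals[:n]:
--         if x == 0:
--             zeros += 1
--         else:
--             prod *= x
--     out = [0 if zeros else prod]
--     for y, x in zip(vals, vals[n:]):
--         if y == 0:
--             zeros -= 1
--         else:
--             prod //= y
--         if x == 0:
--             zeros += 1
--         else:
--             prod *= x
--         out.append(0 if zeros else prod)
--     return out
--
--
-- def greatest_vertical_adjacent_product(n, array_2d):
--     """Greatest product of n vertically adjacent numbers, column by column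
--     with a sliding window.  A missing cell of a ragged grid counts as 0,
--     which can never beat the nonnegative running maximum."""
--     best = 0
--     if n < 1:
--         return best
--     width = 0
--     for row in array_2d:
--         width = max(width, len(row))
--     for j in range(width):
--         col = [row[j] if j < len(row) else 0 for row in array_2d]
--         for p in _window_products(n, col):
--             if p > best:
--                 best = p
--     return best
-- ===== Notes on version B (the rewrite author's own statement) =====
-- stated objective: alternative
-- what changed: Column-major sliding window: per column the n-element window product is maintained incrementally with a zero count and one exact divide per step (missing cells of a ragged grid count as 0, which never beats the nonnegative running max), instead of recomputing an n-term product for every (row, column) window; it trades A's per-window inner loop for per-column state bookkeeping.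
import Mathlib
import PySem

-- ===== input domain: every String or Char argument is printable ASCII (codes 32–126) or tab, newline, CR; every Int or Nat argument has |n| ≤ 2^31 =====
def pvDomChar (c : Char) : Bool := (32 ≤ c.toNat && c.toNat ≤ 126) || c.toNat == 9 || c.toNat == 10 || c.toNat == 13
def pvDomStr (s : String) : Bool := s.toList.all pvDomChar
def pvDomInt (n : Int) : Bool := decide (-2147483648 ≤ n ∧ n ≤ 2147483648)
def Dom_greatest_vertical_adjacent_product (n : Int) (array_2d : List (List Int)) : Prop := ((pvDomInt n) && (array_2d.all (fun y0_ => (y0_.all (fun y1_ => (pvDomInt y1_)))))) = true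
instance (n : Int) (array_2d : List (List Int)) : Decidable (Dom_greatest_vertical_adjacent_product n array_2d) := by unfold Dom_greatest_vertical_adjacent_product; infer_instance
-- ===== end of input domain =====

-- B is an alternative algorithm: a column-major sliding window that updates each
-- column's n-element product incrementally (zero count + one exact divide per step)
-- instead of A's recomputation of an n-term product for every (row, column) window.


-- ===== PORT A =====
def greatest_vertical_adjacent_product (n : Int) (array_2d : List (List Int)) : Int :=
  (PySem.List.pyRange 0 ((array_2d.length : Int) - n + 1) 1).foldl (fun greatest i =>
    (PySem.List.pyRange 0 ((PySem.List.pyGetD array_2d i []).length : Int) 1).foldl (fun greatest j =>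
      max greatest ((PySem.List.pyRange 0 n 1).foldl (fun tp k =>
        tp * PySem.List.pyGetD (PySem.List.pyGetD array_2d (i + k) []) j 0) 1)) greatest) 0

-- ===== PORT B =====
-- port of Source B's _window_products: sliding window with a zero count and one exact divide
def pvWindowProducts (n : Int) (vals : List Int) : List Int :=
  if n < 1 ∨ (vals.length : Int) < n then []
  else
    let zp := (PySem.List.slice vals none (some n)).foldl
      (fun (st : Int × Int) x => if x = 0 then (st.1 + 1, st.2) else (st.1, st.2 * x)) (0, 1)
    let fin := (vals.zip (PySem.List.slice vals (some n) none)).foldl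
      (fun (st : Int × Int × List Int) (yx : Int × Int) =>
        let zeros := if yx.1 = 0 then st.1 - 1 else st.1
        let prod  := if yx.1 = 0 then st.2.1 else PySem.Int.floordiv st.2.1 yx.1
        let zeros' := if yx.2 = 0 then zeros + 1 else zeros
        let prod'  := if yx.2 = 0 then prod else prod * yx.2
        (zeros', prod', st.2.2 ++ [if zeros' ≠ 0 then 0 else prod']))
      (zp.1, zp.2, [if zp.1 ≠ 0 then 0 else zp.2])
    fin.2.2

def greatest_vertical_adjacent_product_alt (n : Int) (array_2d : List (List Int)) : Int :=
  if n < 1 then 0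
  else
    let width := array_2d.foldl (fun w row => max w (row.length : Int)) 0
    (PySem.List.pyRange 0 width 1).foldl (fun best j =>
      let col := array_2d.map (fun row => if j < (row.length : Int) then PySem.List.pyGetD row j 0 else 0)
      (pvWindowProducts n col).foldl (fun best p => if p > best then p else best) best) 0

-- ===== PRECONDITION & SPEC =====
-- Exactly the inputs on which Python A returns: n ≥ 1 (for n ≤ 0 the i-loop reaches
-- index len(array_2d) and raises IndexError), and in every length-n vertical window the
-- first row is no longer than the rows below it (otherwise array_2d[i+k][j] raises IndexError).
def Pre_greatest_vertical_adjacent_product (n : Int) (array_2d : List (List Int)) : Prop :=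
  1 ≤ n ∧ ∀ i < array_2d.length, ∀ k < array_2d.length,
    (i + n.toNat ≤ array_2d.length ∧ k < n.toNat) →
    (array_2d.getD i []).length ≤ (array_2d.getD (i + k) []).length
instance (n : Int) (array_2d : List (List Int)) : Decidable (Pre_greatest_vertical_adjacent_product n array_2d) := by unfold Pre_greatest_vertical_adjacent_product; infer_instance

def pvWitness_greatest_vertical_adjacent_product : Int × List (List Int) :=
  (2, [[1, 2], [3, -4], [0, 6]])

def Spec_greatest_vertical_adjacent_product (n : Int) (array_2d : List (List Int)) (out : Int) : Prop := out = greatest_vertical_adjacent_product_alt n array_2d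
instance (n : Int) (array_2d : List (List Int)) (out : Int) : Decidable (Spec_greatest_vertical_adjacent_product n array_2d out) := by unfold Spec_greatest_vertical_adjacent_product; infer_instance

-- ===== CLAIM (what is proved, stated in full; the proofs are below) =====
def Claim_equal_greatest_vertical_adjacent_product : Prop := ∀ (n : Int) (array_2d : List (List Int)), Dom_greatest_vertical_adjacent_product n array_2d → Pre_greatest_vertical_adjacent_product n array_2d → Spec_greatest_vertical_adjacent_product n array_2d (greatest_vertical_adjacent_product n array_2d)

-- ===== LEMMAS AND PROOFS =====

def pvZ (w : List Int) : Int := (w.count 0 : Int)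

def pvP (w : List Int) : Int := (w.filter (fun x => x ≠ 0)).prod

def pvStep (st : Int × Int × List Int) (yx : Int × Int) : Int × Int × List Int :=
  let zeros := if yx.1 = 0 then st.1 - 1 else st.1
  let prod  := if yx.1 = 0 then st.2.1 else PySem.Int.floordiv st.2.1 yx.1
  let zeros' := if yx.2 = 0 then zeros + 1 else zeros
  let prod'  := if yx.2 = 0 then prod else prod * yx.2
  (zeros', prod', st.2.2 ++ [if zeros' ≠ 0 then 0 else prod'])

theorem pvZ_cons (x : Int) (w : List Int) : pvZ (x :: w) = pvZ w + (if x = 0 then 1 else 0) := by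
  by_cases hx : x = 0 <;> simp [pvZ, hx]

theorem pvZ_append (w : List Int) (x : Int) : pvZ (w ++ [x]) = pvZ w + (if x = 0 then 1 else 0) := by
  by_cases hx : x = 0 <;> simp [pvZ, List.count_append, hx]

theorem pvP_cons (x : Int) (w : List Int) : pvP (x :: w) = (if x = 0 then 1 else x) * pvP w := by
  by_cases hx : x = 0 <;> simp [pvP, hx]

theorem pvP_append (w : List Int) (x : Int) : pvP (w ++ [x]) = pvP w * (if x = 0 then 1 else x) := by
  by_cases hx : x = 0 <;> simp [pvP, List.filter_append, hx]

theorem pv_prod_eq (w : List Int) : w.prod = if pvZ w ≠ 0 then 0 else pvP w := by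
  induction w with
  | nil => simp [pvZ, pvP]
  | cons x w ih =>
    by_cases hx : x = 0
    · have h : pvZ (x :: w) ≠ 0 := by
        rw [pvZ_cons]
        have h0 : (0:Int) ≤ pvZ w := by simp [pvZ]
        rw [if_pos hx]; omega
      rw [if_pos h]; simp [hx]
    · have h1 : pvZ (x :: w) = pvZ w := by rw [pvZ_cons]; simp [hx]
      have h2 : pvP (x :: w) = x * pvP w := by rw [pvP_cons]; simp [hx]
      simp only [List.prod_cons, ih, h1, h2]
      split_ifs <;> simp

theorem pv_step_eq (v x : Int) (m : List Int) (acc : List Int) :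
    pvStep (pvZ (v :: m), pvP (v :: m), acc) (v, x)
      = (pvZ (m ++ [x]), pvP (m ++ [x]), acc ++ [(m ++ [x]).prod]) := by
  have hz : (if v = 0 then pvZ (v :: m) - 1 else pvZ (v :: m)) = pvZ m := by
    rw [pvZ_cons]; split_ifs <;> simp
  have hp : (if v = 0 then pvP (v :: m) else PySem.Int.floordiv (pvP (v :: m)) v) = pvP m := by
    rw [pvP_cons]; split_ifs with hv
    · simp
    · simp [PySem.Int.floordiv, Int.mul_fdiv_cancel_left _ hv]
  simp only [pvStep, hz, hp, pvZ_append, pvP_append, pv_prod_eq]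
  by_cases hx : x = 0 <;> simp [hx]

theorem pv_slide (M : Nat) :
    ∀ (vals : List Int) (acc : List Int), M + 1 ≤ vals.length →
    ((vals.zip (vals.drop (M+1))).foldl pvStep
      (pvZ (vals.take (M+1)), pvP (vals.take (M+1)), acc)).2.2
    = acc ++ (List.range (vals.length - (M+1))).map (fun t => ((vals.drop (t + 1)).take (M+1)).prod) := by
  intro vals
  induction vals with
  | nil => intro acc h; simp at h
  | cons v vs ih =>
    intro acc h
    by_cases hlen : vs.length < M + 1
    · have h2 : (v :: vs).drop (M+1) = [] := by
        apply List.drop_eq_nil_of_le; simp; omega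
      have h1 : vs.length + 1 - (M+1) = 0 := by omega
      simp [h2, h1]
    · rw [not_lt] at hlen
      have hM : M < vs.length := by omega
      have hdrop : (v :: vs).drop (M+1) = vs[M] :: vs.drop (M+1) := by
        rw [List.drop_succ_cons, List.drop_eq_getElem_cons hM]
      have htake2 : vs.take (M+1) = vs.take M ++ [vs[M]] := (List.take_append_getElem hM).symm
      rw [hdrop, List.take_succ_cons, List.zip_cons_cons, List.foldl_cons, pv_step_eq, ← htake2,
        ih (acc ++ [(vs.take (M+1)).prod]) hlen]
      have hr : vs.length + 1 - (M+1) = (vs.length - (M+1)) + 1 := by omega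
      simp only [List.length_cons, hr, List.range_succ_eq_map, List.map_cons, List.map_map]
      simp [Function.comp_def]

theorem pv_init_fold (w : List Int) (z p : Int) :
    w.foldl (fun (st : Int × Int) x => if x = 0 then (st.1 + 1, st.2) else (st.1, st.2 * x)) (z, p)
      = (z + pvZ w, p * pvP w) := by
  induction w generalizing z p with
  | nil => simp [pvZ, pvP]
  | cons x w ih =>
    by_cases hx : x = 0
    · rw [List.foldl_cons, if_pos hx, ih, pvZ_cons, pvP_cons, if_pos hx, if_pos hx]
      simp only [Prod.mk.injEq]; exact ⟨by ring, by ring⟩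
    · rw [List.foldl_cons, if_neg hx, ih, pvZ_cons, pvP_cons, if_neg hx, if_neg hx]
      simp only [Prod.mk.injEq]; exact ⟨by ring, by ring⟩

theorem pv_window_products (n : Int) (hn : 1 ≤ n) (vals : List Int) :
    pvWindowProducts n vals
      = (List.range (vals.length + 1 - n.toNat)).map
          (fun t => ((vals.drop t).take n.toNat).prod) := by
  unfold pvWindowProducts
  by_cases hlen : (vals.length : Int) < n
  · have : vals.length + 1 - n.toNat = 0 := by omega
    simp [hlen, this]
  · rw [if_neg (by omega)]
    have hsl1 : PySem.List.slice vals none (some n) = vals.take n.toNat :=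
      PySem.List.slice_to vals (by omega)
    have hsl2 : PySem.List.slice vals (some n) none = vals.drop n.toNat :=
      PySem.List.slice_from vals (by omega)
    obtain ⟨M, hM⟩ : ∃ M, n.toNat = M + 1 := ⟨n.toNat - 1, by omega⟩
    simp only [hsl1, hsl2, pv_init_fold, zero_add, one_mul, hM]
    have hfold := pv_slide M vals [if pvZ (vals.take (M+1)) ≠ 0 then 0 else pvP (vals.take (M+1))] (by omega)
    rw [show (fun (st : Int × Int × List Int) (yx : Int × Int) =>
        let zeros := if yx.1 = 0 then st.1 - 1 else st.1
        let prod  := if yx.1 = 0 then st.2.1 else PySem.Int.floordiv st.2.1 yx.1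
        let zeros' := if yx.2 = 0 then zeros + 1 else zeros
        let prod'  := if yx.2 = 0 then prod else prod * yx.2
        (zeros', prod', st.2.2 ++ [if zeros' ≠ 0 then 0 else prod'])) = pvStep from rfl]
    rw [hfold]
    have hr : vals.length + 1 - (M+1) = (vals.length - (M+1)) + 1 := by omega
    rw [hr, List.range_succ_eq_map, List.map_cons, ← pv_prod_eq]
    simp [Function.comp_def]

def pvVal (g : List (List Int)) (N i j : Nat) : Int :=
  ((List.range N).map (fun k => (g.getD (i + k) []).getD j 0)).prod

theorem pv_foldl_pyRange {σ : Type} (m : Int) (f : σ → Int → σ) (b : σ) :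
    (PySem.List.pyRange 0 m 1).foldl f b = (List.range m.toNat).foldl (fun s (k : Nat) => f s (k : Int)) b := by
  rw [PySem.List.pyRange_one]
  simp only [List.foldl_map, zero_add, sub_zero]

theorem pv_foldl_mul (N : Nat) (f : Nat → Int) :
    (List.range N).foldl (fun a k => a * f k) 1 = ((List.range N).map f).prod := by
  rw [List.prod_eq_foldl, List.foldl_map]

theorem pv_foldl_foldl_max {α : Type} (l : List α) (f : α → List Int) (b : Int) :
    l.foldl (fun acc x => (f x).foldl max acc) b = (l.flatMap f).foldl max b := by
  induction l generalizing b with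
  | nil => rfl
  | cons a l ih => simp [List.foldl_append, ih]

theorem pv_A_eq (n : Int) (hn : 1 ≤ n) (g : List (List Int)) :
    greatest_vertical_adjacent_product n g
      = ((List.range (g.length + 1 - n.toNat)).flatMap (fun i =>
          (List.range (g.getD i []).length).map (fun j => pvVal g n.toNat i j))).foldl max 0 := by
  unfold greatest_vertical_adjacent_product
  rw [pv_foldl_pyRange]
  have hS : ((g.length : Int) - n + 1).toNat = g.length + 1 - n.toNat := by omega
  rw [hS]
  refine Eq.trans ?_ (pv_foldl_foldl_max (List.range (g.length + 1 - n.toNat))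
    (fun i => (List.range (g.getD i []).length).map (fun j => pvVal g n.toNat i j)) 0)
  apply PySem.List.foldl_congr_mem
  intro acc i _
  simp only [PySem.List.pyGetD_natCast]
  rw [pv_foldl_pyRange, List.foldl_map, Int.toNat_natCast]
  apply PySem.List.foldl_congr_mem
  intro acc2 j _
  congr 1
  rw [pv_foldl_pyRange]
  have hbody : ∀ (tp : Int) (k : Nat),
      tp * PySem.List.pyGetD (PySem.List.pyGetD g ((i:Int) + (k:Int)) []) (j:Int) 0
        = tp * (g.getD (i + k) []).getD j 0 := by
    intro tp k
    rw [← Nat.cast_add]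
    simp only [PySem.List.pyGetD_natCast]
  simp only [hbody]
  rw [pv_foldl_mul]
  rfl

theorem pv_width_cast (g : List (List Int)) : ∀ b : Nat,
    g.foldl (fun w row => max w (row.length : Int)) (b : Int)
      = ((g.foldl (fun w row => max w row.length) b : Nat) : Int) := by
  induction g with
  | nil => intro b; rfl
  | cons r g ih =>
    intro b
    simp only [List.foldl_cons, ← Nat.cast_max, ih]

theorem pv_width_cast0 (g : List (List Int)) :
    g.foldl (fun w row => max w (row.length : Int)) 0
      = ((g.foldl (fun w row => max w row.length) 0 : Nat) : Int) := by
  simpa using pv_width_cast g 0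

theorem pv_if_max (b p : Int) : (if p > b then p else b) = max b p := by
  rw [max_def]; split_ifs <;> omega

theorem pv_col_eq (g : List (List Int)) (j : Nat) :
    g.map (fun row => if (j : Int) < (row.length : Int) then PySem.List.pyGetD row (j : Int) 0 else 0)
      = g.map (fun row => row.getD j 0) := by
  apply List.map_congr_left; intro row _
  by_cases h : j < row.length
  · rw [if_pos (by exact_mod_cast h)]; simp
  · rw [if_neg (by exact_mod_cast h), List.getD_eq_default _ _ (by omega)]

theorem pv_win_eq (g : List (List Int)) (N t j : Nat) (ht : t + N ≤ g.length) :
    (((g.map (fun row => row.getD j 0)).drop t).take N).prod = pvVal g N t j := by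
  unfold pvVal
  congr 1
  apply List.ext_getElem
  · simp; omega
  · intro k h1 h2
    simp only [List.getElem_take, List.getElem_drop, List.getElem_map, List.getElem_range]
    have hk : t + k < g.length := by simp at h1; omega
    rw [List.getD_eq_getElem g [] hk]

theorem pv_B_eq (n : Int) (hn : 1 ≤ n) (g : List (List Int)) :
    greatest_vertical_adjacent_product_alt n g
      = ((List.range (g.foldl (fun w row => max w row.length) 0)).flatMap (fun j =>
          (List.range (g.length + 1 - n.toNat)).map (fun t => pvVal g n.toNat t j))).foldl max 0 := by
  unfold greatest_vertical_adjacent_product_alt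
  rw [if_neg (by omega)]
  simp only [pv_width_cast0, pv_foldl_pyRange, Int.toNat_natCast]
  refine Eq.trans ?_ (pv_foldl_foldl_max (List.range (g.foldl (fun w row => max w row.length) 0))
    (fun j => (List.range (g.length + 1 - n.toNat)).map (fun t => pvVal g n.toNat t j)) 0)
  apply PySem.List.foldl_congr_mem
  intro acc j _
  simp only [pv_col_eq, pv_window_products n hn, List.length_map, pv_if_max]
  rw [List.foldl_map, List.foldl_map]
  apply PySem.List.foldl_congr_mem
  intro acc2 t ht
  rw [pv_win_eq g n.toNat t j (by simp at ht; omega)]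

theorem pv_fold_max_zero (s : Multiset Int) (h : ∀ x ∈ s, x = 0) : Multiset.fold max 0 s = 0 := by
  induction s using Multiset.induction_on with
  | empty => simp
  | cons a s ih =>
    rw [Multiset.fold_cons_left, h a (Multiset.mem_cons_self a s),
      ih (fun x hx => h x (Multiset.mem_cons_of_mem hx))]
    simp

theorem pv_len_le_width (g : List (List Int)) (i : Nat) (hi : i < g.length) :
    (g.getD i []).length ≤ g.foldl (fun w row => max w row.length) 0 := by
  have hmem : g.getD i [] ∈ g := by
    rw [List.getD_eq_getElem g [] hi]; exact List.getElem_mem hi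
  exact (PySem.List.le_foldl_max_nat g List.length 0).2 _ hmem

theorem pv_val_zero (g : List (List Int)) (N i m : Nat) (hN : 1 ≤ N) :
    pvVal g N i ((g.getD i []).length + m) = 0 := by
  apply List.prod_eq_zero
  simp only [List.mem_map]
  refine ⟨0, by simp [List.mem_range]; omega, ?_⟩
  rw [Nat.add_zero, List.getD_eq_default _ _ (by omega)]

theorem pv_swap (N : Nat) (hN : 1 ≤ N) (g : List (List Int)) :
    ((List.range (g.foldl (fun w row => max w row.length) 0)).flatMap (fun j =>
        (List.range (g.length + 1 - N)).map (fun t => pvVal g N t j))).foldl max 0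
      = ((List.range (g.length + 1 - N)).flatMap (fun i =>
          (List.range (g.getD i []).length).map (fun j => pvVal g N i j))).foldl max 0 := by
  have hW : ∀ t, t < g.length + 1 - N → (g.getD t []).length ≤ g.foldl (fun w row => max w row.length) 0 := by
    intro t ht
    exact pv_len_le_width g t (by omega)
  rw [← Multiset.coe_fold_l, ← Multiset.coe_fold_l, ← Multiset.coe_bind, ← Multiset.coe_bind]
  simp only [← Multiset.map_coe]
  -- swap the two binds
  have hswap : (↑(List.range (g.foldl (fun w row => max w row.length) 0)) : Multiset Nat).bind
        (fun j => Multiset.map (fun t => pvVal g N t j) ↑(List.range (g.length + 1 - N)))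
      = (↑(List.range (g.length + 1 - N)) : Multiset Nat).bind
        (fun t => Multiset.map (fun j => pvVal g N t j) ↑(List.range (g.foldl (fun w row => max w row.length) 0))) := by
    simp only [← Multiset.bind_singleton]
    exact Multiset.bind_bind _ _
  rw [hswap]
  simp only [Multiset.map_coe]
  -- split each row's range at the row length; the tail contributes only zeros
  have hsplit : ∀ t ∈ (↑(List.range (g.length + 1 - N)) : Multiset Nat),
      (↑((List.range (g.foldl (fun w row => max w row.length) 0)).map (fun j => pvVal g N t j)) : Multiset Int)
        = (↑((List.range (g.getD t []).length).map (fun j => pvVal g N t j)) : Multiset Int)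
          + ↑((List.range (g.foldl (fun w row => max w row.length) 0 - (g.getD t []).length)).map (fun _ => (0:Int))) := by
    intro t ht
    rw [Multiset.mem_coe, List.mem_range] at ht
    have hle := hW t ht
    have hr : List.range (g.foldl (fun w row => max w row.length) 0)
        = List.range ((g.getD t []).length + (g.foldl (fun w row => max w row.length) 0 - (g.getD t []).length)) := by
      congr 1; omega
    rw [hr, List.range_add, List.map_append, List.map_map]
    have hzero : (List.range (g.foldl (fun w row => max w row.length) 0 - (g.getD t []).length)).map
          ((fun j => pvVal g N t j) ∘ (fun x => (g.getD t []).length + x))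
        = (List.range (g.foldl (fun w row => max w row.length) 0 - (g.getD t []).length)).map (fun _ => (0:Int)) := by
      apply List.map_congr_left
      intro m _
      exact pv_val_zero g N t m hN
    rw [hzero]
    exact (Multiset.coe_add _ _).symm
  rw [Multiset.bind_congr hsplit, Multiset.bind_add]
  have hz : Multiset.fold max (0:Int) ((↑(List.range (g.length + 1 - N)) : Multiset Nat).bind
      (fun t => ↑((List.range (g.foldl (fun w row => max w row.length) 0 - (g.getD t []).length)).map (fun _ => (0:Int))))) = (0:Int) := by
    apply pv_fold_max_zero
    intro x hx
    rw [Multiset.mem_bind] at hx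
    obtain ⟨t, _, hx⟩ := hx
    rw [Multiset.mem_coe, List.mem_map] at hx
    obtain ⟨_, _, h⟩ := hx
    exact h.symm
  have hpos : (0:Int) ≤ Multiset.fold max (0:Int) ((↑(List.range (g.length + 1 - N)) : Multiset Nat).bind
      (fun t => ↑((List.range (g.getD t []).length).map (fun j => pvVal g N t j)))) := by
    rw [Multiset.coe_bind, Multiset.coe_fold_l]
    exact (PySem.List.le_foldl_max _ _).1
  have hadd := Multiset.fold_add (max : Int → Int → Int) (0:Int) (0:Int)
    ((↑(List.range (g.length + 1 - N)) : Multiset Nat).bind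
      (fun t => ↑((List.range (g.getD t []).length).map (fun j => pvVal g N t j))))
    ((↑(List.range (g.length + 1 - N)) : Multiset Nat).bind
      (fun t => ↑((List.range (g.foldl (fun w row => max w row.length) 0 - (g.getD t []).length)).map (fun _ => (0:Int)))))
  rw [max_self] at hadd
  rw [hadd, hz, max_eq_left hpos]

-- ===== VERDICT (by name: the statement is the Claim_ definition above) =====
theorem greatest_vertical_adjacent_product_spec : Claim_equal_greatest_vertical_adjacent_product := by
  intro n g _ hPre
  unfold Spec_greatest_vertical_adjacent_product
  have hn : 1 ≤ n := hPre.1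
  rw [pv_A_eq n hn g, pv_B_eq n hn g, pv_swap n.toNat (by omega) g]
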